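-- pv_equiv track=rewrite | github.com/simtb/coding-puzzles | daily_coding_challenges/challenges/step_word.py | step_word
-- ===== SOURCE A (Python) =====
-- from typing import List
-- import string
--
-- def is_anagram(word_1: str, word_2: str) -> bool:
--     word_1_counter: dict = {}
--
--     for letter in word_1:
--         if letter in word_1_counter:
--            word_1_counter[letter] += 1
--         else:
--             word_1_counter[letter]: int = 1
--
--     for letter in word_2:
--         if letter not in word_1_counter:
--             return False
--         else:
--             if word_1_counter[letter] == 0:
--                 return False
--             else:
--                 word_1_counter[letter] -= 1
--
--     for letter in word_1_counter:
--         if word_1_counter[letter] != 0: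
--             return False
--     return True
--
-- def step_word(word: str, dictionary: List[str]) -> List[str]:
--     alphabet: str = string.ascii_lowercase
--     step_words: List[str] = []
--
--     for letter in alphabet:
--         word_: str = word + letter
--         for entry in dictionary:
--             if is_anagram(entry.lower(), word_.lower()):
--                 step_words.append(entry.lower())
--
--     return step_words
-- ===== SOURCE B (Python) =====
-- from typing import List
-- import string
--
--
-- def _extra_letter(entry_l: str, word_l: str):
--     """If entry_l's multiset of chars is word_l's plus exactly one extra char,
--     return that char, else None."""
--     counts: dict = {}
--     for ch in entry_l:
--         counts[ch] = counts.get(ch, 0) + 1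
--     for ch in word_l:
--         n = counts.get(ch, 0)
--         if n == 0:
--             return None
--         counts[ch] = n - 1
--     extra = None
--     for ch, n in counts.items():
--         if n == 0:
--             continue
--         if n != 1 or extra is not None:
--             return None
--         extra = ch
--     return extra
--
--
-- def step_word(word: str, dictionary: List[str]) -> List[str]:
--     # One pass over the dictionary: tag each entry with its extra letter,
--     # then emit the groups in alphabetical order of that letter.
--     word_l = word.lower()
--     tagged = []
--     for entry in dictionary:
--         entry_l = entry.lower()
--         x = _extra_letter(entry_l, word_l)
--         if x is not None:
--             tagged.append((x, entry_l))
--     result: List[str] = []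
--     for letter in string.ascii_lowercase:
--         result.extend(e for x, e in tagged if x == letter)
--     return result
-- ===== Notes on version B (the rewrite author's own statement) =====
-- stated objective: faster
-- what changed: Instead of running a counter-based anagram test of every dictionary entry against word+letter for each of the 26 letters, B makes one pass over the dictionary computing each entry's multiset difference against the word (its unique extra letter, if any) and then emits the groups in alphabetical order of that letter.
import Mathlib
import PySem

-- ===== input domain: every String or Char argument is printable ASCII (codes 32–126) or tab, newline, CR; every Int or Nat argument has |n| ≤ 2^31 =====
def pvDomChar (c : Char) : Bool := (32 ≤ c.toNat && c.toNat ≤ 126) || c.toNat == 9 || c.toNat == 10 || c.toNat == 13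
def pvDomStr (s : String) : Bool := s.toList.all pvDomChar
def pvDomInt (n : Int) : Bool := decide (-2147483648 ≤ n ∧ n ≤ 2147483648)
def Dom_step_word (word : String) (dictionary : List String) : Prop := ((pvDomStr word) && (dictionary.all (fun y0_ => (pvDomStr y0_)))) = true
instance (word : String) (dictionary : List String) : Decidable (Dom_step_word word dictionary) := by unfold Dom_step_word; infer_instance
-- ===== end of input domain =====

-- B replaces A's 26 anagram scans of the dictionary by ONE pass that computes each
-- entry's extra letter directly, grouping the matches by that letter (objective: faster).

-- ===== PORT A =====
-- string.ascii_lowercase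
def swAlphabet : List Char := "abcdefghijklmnopqrstuvwxyz".toList

-- first loop of is_anagram: build the counter of word_1
def swCounter (cs : List Char) : PySem.Dict Char Int :=
  cs.foldl (fun d letter =>
    match d.get? letter with
    | some n => d.insert letter (n + 1)
    | none   => d.insert letter 1) PySem.Dict.empty

-- second loop of is_anagram: consume word_2; the early 'return False' is 'none'
def swConsume (d : PySem.Dict Char Int) : List Char → Option (PySem.Dict Char Int)
  | [] => some d
  | letter :: rest =>
    match d.get? letter with
    | none => none
    | some n => if n == 0 then none else swConsume (d.insert letter (n - 1)) rest

-- third loop of is_anagram iterates the counter's keys and reads each value: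
-- that is exactly a pass over its items
def is_anagram (word_1 word_2 : String) : Bool :=
  match swConsume (swCounter word_1.toList) word_2.toList with
  | none => false
  | some d => d.items.all (fun p => p.2 == 0)

def step_word (word : String) (dictionary : List String) : List String :=
  swAlphabet.foldl (fun step_words letter =>
    let word_ : String := word ++ String.ofList [letter]
    dictionary.foldl (fun acc entry =>
      if is_anagram (PySem.Str.lower entry) (PySem.Str.lower word_)
      then acc ++ [PySem.Str.lower entry] else acc) step_words) []

-- ===== PORT B =====
def swAlphabetB : List Char := "abcdefghijklmnopqrstuvwxyz".toList

-- _extra_letter, loop 1: count the entry's characters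
def swCountB (cs : List Char) : PySem.Dict Char Int :=
  cs.foldl (fun d ch => d.insert ch (d.getD ch 0 + 1)) PySem.Dict.empty

-- _extra_letter, loop 2: remove the word's characters ('return None' is 'none')
def swTakeAway (counts : PySem.Dict Char Int) : List Char → Option (PySem.Dict Char Int)
  | [] => some counts
  | ch :: rest =>
    let n := counts.getD ch 0
    if n == 0 then none else swTakeAway (counts.insert ch (n - 1)) rest

-- _extra_letter, loop 3: the unique leftover character, if any
def swFindExtra (extra : Option Char) : List (Char × Int) → Option Char
  | [] => extra
  | (ch, n) :: rest =>
    if n == 0 then swFindExtra extra rest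
    else if n != 1 || extra.isSome then none
    else swFindExtra (some ch) rest

def swExtraLetter (entryL wordL : List Char) : Option Char :=
  match swTakeAway (swCountB entryL) wordL with
  | none => none
  | some counts => swFindExtra none counts.items

def step_word_alt (word : String) (dictionary : List String) : List String :=
  let wordL := PySem.Str.lower word
  let tagged := dictionary.foldl (fun acc entry =>
    let entryL := PySem.Str.lower entry
    match swExtraLetter entryL.toList wordL.toList with
    | some x => acc ++ [(x, entryL)]
    | none => acc) []
  swAlphabetB.foldl (fun result letter =>
    result ++ (tagged.filter (fun p => p.1 == letter)).map (fun p => p.2)) []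

-- ===== PRECONDITION & SPEC =====
def Spec_step_word (word : String) (dictionary : List String) (out : List String) : Prop := out = step_word_alt word dictionary
instance (word : String) (dictionary : List String) (out : List String) : Decidable (Spec_step_word word dictionary out) := by unfold Spec_step_word; infer_instance

-- ===== CLAIM (what is proved, stated in full; the proofs are below) =====
def Claim_equal_step_word : Prop := ∀ (word : String) (dictionary : List String), Dom_step_word word dictionary → Spec_step_word word dictionary (step_word word dictionary)

-- ===== LEMMAS AND PROOFS =====

-- A's counter loop and B's counting loop build the same dict
lemma swCounter_eq_swCountB (cs : List Char) : swCounter cs = swCountB cs := by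
  unfold swCounter swCountB
  have h : (fun (d : PySem.Dict Char Int) letter =>
      match d.get? letter with
      | some n => d.insert letter (n + 1)
      | none   => d.insert letter 1) =
      (fun (d : PySem.Dict Char Int) ch => d.insert ch (d.getD ch 0 + 1)) := by
    funext d ch
    cases h : d.get? ch <;> simp [PySem.Dict.getD_eq_get?_getD, h]
  rw [h]

lemma swCountB_eq_counter (cs : List Char) : swCountB cs = PySem.Dict.counter cs :=
  PySem.Dict.foldl_insert_getD_add_one_eq_counter cs

-- A's consuming loop and B's consuming loop agree
lemma swConsume_eq_swTakeAway (cs : List Char) : ∀ d, swConsume d cs = swTakeAway d cs := by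
  induction cs with
  | nil => intro d; rfl
  | cons ch rest ih =>
    intro d
    cases h : d.get? ch with
    | none => simp [swConsume, swTakeAway, PySem.Dict.getD_eq_get?_getD, h]
    | some n =>
      simp only [swConsume, swTakeAway, PySem.Dict.getD_eq_get?_getD, h, Option.getD_some]
      split <;> simp [ih]

lemma swTakeAway_append (xs ys : List Char) : ∀ d, swTakeAway d (xs ++ ys) =
    match swTakeAway d xs with
    | none => none
    | some d' => swTakeAway d' ys := by
  induction xs with
  | nil => intro d; rfl
  | cons ch rest ih =>
    intro d
    simp only [List.cons_append, swTakeAway]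
    split
    · rfl
    · exact ih _

lemma swTakeAway_nodup (cs : List Char) : ∀ d d', d.keys.Nodup →
    swTakeAway d cs = some d' → d'.keys.Nodup := by
  induction cs with
  | nil => intro d d' h he; cases he; exact h
  | cons ch rest ih =>
    intro d d' h he
    simp only [swTakeAway] at he
    split at he
    · cases he
    · exact ih _ _ (PySem.Dict.nodup_keys_insert _ _ _ h) he

lemma swTakeAway_nonneg (cs : List Char) : ∀ d d', (∀ k, 0 ≤ d.getD k 0) →
    swTakeAway d cs = some d' → ∀ k, 0 ≤ d'.getD k 0 := by
  induction cs with
  | nil => intro d d' h he; cases he; exact h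
  | cons ch rest ih =>
    intro d d' h he
    simp only [swTakeAway] at he
    split at he
    · cases he
    · rename_i hne
      refine ih _ _ ?_ he
      intro k
      rw [PySem.Dict.getD_insert]
      split
      · have h1 := h ch
        have h2 : d.getD ch 0 ≠ 0 := by simpa using hne
        omega
      · exact h k

-- after a lone leftover has been recorded, the scan succeeds iff the rest is all zero
lemma swFindExtra_some (l : List (Char × Int)) (x : Char) :
    swFindExtra (some x) l = if l.all (fun p => p.2 == 0) then some x else none := by
  induction l with
  | nil => rfl
  | cons p rest ih =>
    obtain ⟨ch, n⟩ := p
    by_cases hn : n = 0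
    · subst hn
      simp only [swFindExtra, List.all_cons]
      by_cases hall : rest.all (fun p => p.2 == 0) = true
      · simp [ih, hall]
      · simp [ih, hall]
    · simp [swFindExtra, hn]

-- a successful scan found the value 1 at its answer (or was handed it)
lemma swFindExtra_mem (l : List (Char × Int)) : ∀ extra c, swFindExtra extra l = some c →
    ((c, (1 : Int)) ∈ l ∨ extra = some c) := by
  induction l with
  | nil => intro extra c h; exact Or.inr h
  | cons p rest ih =>
    intro extra c h
    obtain ⟨ch, n⟩ := p
    simp only [swFindExtra] at h
    split at h
    · rcases ih _ _ h with h1 | h1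
      · exact Or.inl (List.mem_cons_of_mem _ h1)
      · exact Or.inr h1
    · split at h
      · cases h
      · rename_i hz ho
        rcases ih _ _ h with h1 | h1
        · exact Or.inl (List.mem_cons_of_mem _ h1)
        · cases h1
          have hn1 : n = 1 := by
            by_contra hn
            simp [hn] at ho
          exact Or.inl (by simp [hn1])

-- characterisation of the leftover scan over a nodup key list with nonnegative values
lemma swFindExtra_main (K : List Char) (g : Char → Int) (c : Char) (hnd : K.Nodup)
    (h0 : ∀ k ∈ K, 0 ≤ g k) :
    swFindExtra none (K.map (fun k => (k, g k))) = some c ↔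
      (c ∈ K ∧ g c = 1 ∧ ∀ k ∈ K, k ≠ c → g k = 0) := by
  induction K with
  | nil => simp [swFindExtra]
  | cons k K' ih =>
    have hnd' : K'.Nodup := hnd.of_cons
    have hk_not : k ∉ K' := (List.nodup_cons.mp hnd).1
    have h0' : ∀ k' ∈ K', 0 ≤ g k' := fun k' hk' => h0 k' (List.mem_cons_of_mem _ hk')
    by_cases hz : g k = 0
    · simp only [List.map_cons, swFindExtra, hz]
      rw [if_pos (by simp)]
      rw [ih hnd' h0']
      constructor
      · rintro ⟨hc, h1, h2⟩
        exact ⟨List.mem_cons_of_mem _ hc, h1, by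
          intro k' hk' hne
          rcases List.mem_cons.mp hk' with rfl | hk'
          · exact hz
          · exact h2 k' hk' hne⟩
      · rintro ⟨hc, h1, h2⟩
        rcases List.mem_cons.mp hc with rfl | hc
        · exact absurd h1 (by omega)
        · exact ⟨hc, h1, fun k' hk' hne => h2 k' (List.mem_cons_of_mem _ hk') hne⟩
    · by_cases ho : g k = 1
      · simp only [List.map_cons, swFindExtra]
        rw [if_neg (by simpa using hz), if_neg (by simp [ho])]
        rw [swFindExtra_some]
        have hall : (K'.map (fun k => (k, g k))).all (fun p => p.2 == 0) = true ↔
            ∀ k' ∈ K', g k' = 0 := by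
          simp [List.all_eq_true]
        by_cases hA : ∀ k' ∈ K', g k' = 0
        · rw [if_pos (hall.mpr hA)]
          constructor
          · rintro h; cases h
            exact ⟨by simp, ho, by
              intro k' hk' hne
              rcases List.mem_cons.mp hk' with rfl | hk'
              · exact absurd rfl hne
              · exact hA k' hk'⟩
          · rintro ⟨hc, h1, h2⟩
            rcases List.mem_cons.mp hc with rfl | hc
            · rfl
            · exact absurd h1 (by rw [hA c hc]; omega)
        · rw [if_neg (by simpa [hall] using hA)]
          constructor
          · intro h; cases h
          · rintro ⟨hc, h1, h2⟩
            rcases List.mem_cons.mp hc with rfl | hc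
            · exact absurd (fun k' hk' => h2 k' (List.mem_cons_of_mem _ hk')
                (fun he => hk_not (he ▸ hk'))) hA
            · have := h2 k (by simp) (fun he => hk_not (he ▸ hc))
              omega
      · -- g k ∉ {0,1}: immediate failure
        simp only [List.map_cons, swFindExtra]
        rw [if_neg (by simpa using hz), if_pos (by simp [ho])]
        constructor
        · intro h; cases h
        · rintro ⟨hc, h1, h2⟩
          rcases List.mem_cons.mp hc with rfl | hc
          · exact (ho h1).elim
          · have := h2 k (by simp) (fun he => hk_not (he ▸ hc))
            omega

-- the heart: testing one more letter c against a leftover dict is the same as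
-- scanning the dict for its unique leftover and comparing with c
lemma swDict_case (d : PySem.Dict Char Int) (c : Char) (hnd : d.keys.Nodup)
    (h0 : ∀ k, 0 ≤ d.getD k 0) :
    ((match swTakeAway d [c] with
      | none => false
      | some d' => d'.items.all (fun p => p.2 == 0)) = true
      ↔ swFindExtra none d.items = some c) := by
  by_cases hz : d.getD c 0 = 0
  · simp only [swTakeAway, hz]
    rw [if_pos (by simp)]
    simp only [Bool.false_eq_true, false_iff]
    intro h
    rcases swFindExtra_mem _ _ _ h with h1 | h1
    · have := PySem.Dict.getD_of_mem_items d h1 hnd 0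
      omega
    · cases h1
  · have hc : d.contains c = true := by
      by_contra hcc
      exact hz (PySem.Dict.getD_of_not_contains d 0 (by simpa using hcc))
    have hmem : c ∈ d.keys := (PySem.Dict.contains_iff_mem_keys d c).mp hc
    simp only [swTakeAway]
    rw [if_neg (by simpa using hz)]
    have hkeys : (d.insert c (d.getD c 0 - 1)).keys = d.keys :=
      PySem.Dict.keys_insert_of_contains d _ hc
    have hnd' : (d.insert c (d.getD c 0 - 1)).keys.Nodup := hkeys ▸ hnd
    show ((d.insert c (d.getD c 0 - 1)).items.all (fun p => p.2 == 0)) = true ↔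
        swFindExtra none d.items = some c
    rw [PySem.Dict.items_eq_map_keys _ hnd' 0, hkeys,
        PySem.Dict.items_eq_map_keys d hnd 0,
        swFindExtra_main d.keys _ c hnd (fun k _ => h0 k)]
    simp only [List.all_map, List.all_eq_true, Function.comp_apply, beq_iff_eq,
      PySem.Dict.getD_insert]
    constructor
    · intro h
      have hc1 := h c hmem
      rw [if_pos rfl] at hc1
      refine ⟨hmem, by omega, fun k hk hne => ?_⟩
      have := h k hk
      rwa [if_neg hne] at this
    · rintro ⟨_, h1, h2⟩ k hk
      by_cases hke : k = c
      · subst hke; rw [if_pos rfl]; omega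
      · rw [if_neg hke]; exact h2 k hk hke

-- per entry: A's anagram test against word ++ [c] succeeds iff B's extra letter is c
lemma swAnagram_iff (el w : List Char) (c : Char) :
    ((match swConsume (swCounter el) (w ++ [c]) with
      | none => false
      | some d => d.items.all (fun p => p.2 == 0)) = true
      ↔ swExtraLetter el w = some c) := by
  rw [swConsume_eq_swTakeAway, swCounter_eq_swCountB, swTakeAway_append]
  unfold swExtraLetter
  cases h : swTakeAway (swCountB el) w with
  | none => simp
  | some d =>
    have hnd : d.keys.Nodup := by
      refine swTakeAway_nodup w _ _ ?_ h
      rw [swCountB_eq_counter]; exact PySem.Dict.nodup_keys_counter el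
    have h0 : ∀ k, 0 ≤ d.getD k 0 := by
      refine swTakeAway_nonneg w _ _ ?_ h
      intro k
      rw [swCountB_eq_counter, PySem.Dict.getD_counter]
      positivity
    exact swDict_case d c hnd h0

-- string-level form, for an already-lowercase letter c
lemma swAnagram_str (entry word : String) (c : Char) (hc : PySem.Chars.lowerChar c = c) :
    (is_anagram (PySem.Str.lower entry) (PySem.Str.lower (word ++ String.ofList [c])) = true
      ↔ swExtraLetter (PySem.Str.lower entry).toList (PySem.Str.lower word).toList = some c) := by
  unfold is_anagram
  have hw : (PySem.Str.lower (word ++ String.ofList [c])).toList =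
      (PySem.Str.lower word).toList ++ [c] := by
    rw [PySem.Str.toList_lower, PySem.Str.toList_lower, String.toList_append]
    simp [PySem.Chars.lower, String.toList_ofList, hc]
  rw [hw]
  exact swAnagram_iff _ _ c

-- B's tagging loop is a filterMap
lemma swTagged_eq (dictionary : List String) (wl : List Char) : ∀ acc : List (Char × String),
    dictionary.foldl (fun acc entry =>
      match swExtraLetter (PySem.Str.lower entry).toList wl with
      | some x => acc ++ [(x, PySem.Str.lower entry)]
      | none => acc) acc =
    acc ++ dictionary.filterMap (fun entry =>
      (swExtraLetter (PySem.Str.lower entry).toList wl).map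
        (fun x => (x, PySem.Str.lower entry))) := by
  induction dictionary with
  | nil => intro acc; simp
  | cons e rest ih =>
    intro acc
    cases h : swExtraLetter (PySem.Str.lower e).toList wl with
    | none =>
      simp only [List.foldl_cons, List.filterMap_cons, h, Option.map_none]
      exact ih acc
    | some x =>
      simp only [List.foldl_cons, List.filterMap_cons, h, Option.map_some]
      rw [ih]
      simp [List.append_assoc]

-- per letter: A's scan of the dictionary equals B's group for that letter
lemma swGroup_eq (dictionary : List String) (word : String) (c : Char)
    (hc : PySem.Chars.lowerChar c = c) :
    (dictionary.filter (fun entry =>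
        is_anagram (PySem.Str.lower entry) (PySem.Str.lower (word ++ String.ofList [c])))).map
      (fun entry => PySem.Str.lower entry) =
    ((dictionary.filterMap (fun entry =>
        (swExtraLetter (PySem.Str.lower entry).toList (PySem.Str.lower word).toList).map
          (fun x => (x, PySem.Str.lower entry)))).filter
      (fun p => p.1 == c)).map (fun p => p.2) := by
  induction dictionary with
  | nil => rfl
  | cons e rest ih =>
    cases h : swExtraLetter (PySem.Str.lower e).toList (PySem.Str.lower word).toList with
    | none =>
      have hA : is_anagram (PySem.Str.lower e) (PySem.Str.lower (word ++ String.ofList [c])) = false := by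
        rw [← Bool.not_eq_true]
        intro hh
        rw [(swAnagram_str e word c hc)] at hh
        rw [h] at hh; cases hh
      rw [List.filter_cons, List.filterMap_cons, h, Option.map_none, hA]
      simpa using ih
    | some x =>
      by_cases hx : x = c
      · subst hx
        have hA : is_anagram (PySem.Str.lower e) (PySem.Str.lower (word ++ String.ofList [x])) = true := by
          rw [swAnagram_str e word x hc]; exact h
        rw [List.filter_cons, List.filterMap_cons, h, Option.map_some, hA,
            if_pos rfl, List.filter_cons, if_pos (by simp), List.map_cons, ih,
            List.map_cons]
      · have hA : is_anagram (PySem.Str.lower e) (PySem.Str.lower (word ++ String.ofList [c])) = false := by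
          rw [← Bool.not_eq_true]
          intro hh
          rw [swAnagram_str e word c hc, h] at hh
          exact hx (by simpa using hh)
        rw [List.filter_cons, List.filterMap_cons, h, Option.map_some, hA,
            if_neg (by simp), List.filter_cons, if_neg (by simpa using hx)]
        exact ih

lemma swFlatMap_congr {α β : Type} (L : List α) (g h : α → List β)
    (he : ∀ x ∈ L, g x = h x) : L.flatMap g = L.flatMap h := by
  induction L with
  | nil => rfl
  | cons x rest ih =>
    simp only [List.flatMap_cons]
    rw [he x (by simp), ih (fun y hy => he y (List.mem_cons_of_mem _ hy))]

-- ===== VERDICT (by name: the statement is the Claim_ definition above) =====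
theorem step_word_spec : Claim_equal_step_word := by
  intro word dictionary _
  unfold Spec_step_word step_word step_word_alt
  -- A's nested loops as a flatMap of per-letter filters
  have hA : (fun (step_words : List String) letter =>
      dictionary.foldl (fun acc entry =>
        if is_anagram (PySem.Str.lower entry) (PySem.Str.lower (word ++ String.ofList [letter]))
        then acc ++ [PySem.Str.lower entry] else acc) step_words) =
      (fun step_words letter => step_words ++
        (dictionary.filter (fun entry =>
          is_anagram (PySem.Str.lower entry) (PySem.Str.lower (word ++ String.ofList [letter])))).map
          (fun entry => PySem.Str.lower entry)) := by
    funext step_words letter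
    exact PySem.List.foldl_append_if _ _ dictionary step_words
  have hB : (let wordL := PySem.Str.lower word;
      let tagged := dictionary.foldl (fun acc entry =>
        let entryL := PySem.Str.lower entry
        match swExtraLetter entryL.toList wordL.toList with
        | some x => acc ++ [(x, entryL)]
        | none => acc) [];
      swAlphabetB.foldl (fun result letter =>
        result ++ (tagged.filter (fun p => p.1 == letter)).map (fun p => p.2)) []) =
      swAlphabetB.foldl (fun result letter =>
        result ++ ((dictionary.foldl (fun acc entry =>
            match swExtraLetter (PySem.Str.lower entry).toList (PySem.Str.lower word).toList with
            | some x => acc ++ [(x, PySem.Str.lower entry)]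
            | none => acc) []).filter (fun p => p.1 == letter)).map (fun p => p.2)) [] := rfl
  rw [hA, hB, swTagged_eq, List.nil_append, PySem.List.foldl_append_eq_flatMap]
  rw [PySem.List.foldl_append_eq_flatMap, List.nil_append, List.nil_append]
  have halpha : swAlphabet = swAlphabetB := rfl
  rw [halpha]
  refine swFlatMap_congr _ _ _ ?_
  intro c hcmem
  have hc : PySem.Chars.lowerChar c = c := by
    rw [show swAlphabetB = ['a','b','c','d','e','f','g','h','i','j','k','l','m',
      'n','o','p','q','r','s','t','u','v','w','x','y','z'] from rfl] at hcmem
    fin_cases hcmem <;> rfl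
  exact swGroup_eq dictionary word c hc
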